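-- pv_equiv track=rewrite | github.com/mooja/dailyprogrammer | challenge261easy.py | can_be_magic_square
-- ===== SOURCE A (Python) =====
-- from itertools import chain, permutations
--
-- def is_magic_square(grid):
--     """
--     >>> is_magic_square([[8, 1, 6], [3, 5, 7], [4, 9, 2]])
--     True
--     >>> is_magic_square([[2, 7, 6], [9, 5, 1], [4, 3, 8]])
--     True
--     >>> is_magic_square([[3, 5, 7], [8, 1, 6], [4, 9, 2]])
--     False
--     >>> is_magic_square([[8, 1, 6], [7, 5, 3], [4, 9, 2]])
--     False
--     """
--     rows = [row for row in grid]
--     cols = [[row[c] for row in rows] for c in range(len(grid))]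
--     diagonal1 = [grid[i][i] for i in range(len(grid))]
--     diagonal2 = [grid[len(grid)-i-1][i] for i in range(len(grid))]
--     lines = chain(rows, cols, [diagonal1, diagonal2])
--     for line in lines:
--         if sum(line) != 15:
--             return False
--     return True
--
-- def can_be_magic_square(incomplete_grid):
--     """
--     >>> can_be_magic_square([[8, 1, 6], [3, 5, 7]])
--     True
--     >>> can_be_magic_square([[3, 5, 7], [8, 1, 6]])
--     False
--     """
--     grid_numbers = chain(*incomplete_grid)
--     missing_numbers = list(set(range(1, 10)) - set(grid_numbers))
--     for perm in permutations(missing_numbers, 3):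
--         grid_candidate = [row for row in incomplete_grid]
--         grid_candidate.append(perm)
--         if is_magic_square(grid_candidate):
--             return True
--     return False
-- ===== SOURCE B (Python) =====
-- def _magic(grid):
--     rows = [row for row in grid]
--     cols = [[row[c] for row in rows] for c in range(len(grid))]
--     diagonal1 = [grid[i][i] for i in range(len(grid))]
--     diagonal2 = [grid[len(grid)-i-1][i] for i in range(len(grid))]
--     for line in rows + cols + [diagonal1, diagonal2]:
--         if sum(line) != 15:
--             return False
--     return True
--
-- def can_be_magic_square(incomplete_grid):
--     missing = set(range(1, 10)) - {x for row in incomplete_grid for x in row}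
--     if len(missing) < 3 or len(incomplete_grid) < 2:
--         return False
--     forced = [15 - sum(row[c] for row in incomplete_grid) for c in range(3)]
--     return _magic(incomplete_grid + [forced]) and len(set(forced)) == 3 and set(forced) <= missing
-- ===== Notes on version B (the rewrite author's own statement) =====
-- stated objective: faster
-- what changed: B replaces A's search over all 3-permutations of the missing digits (each tested with the full magic-square check) by directly constructing the unique third row that makes every column sum to 15 and validating that single candidate.
import Mathlib
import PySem

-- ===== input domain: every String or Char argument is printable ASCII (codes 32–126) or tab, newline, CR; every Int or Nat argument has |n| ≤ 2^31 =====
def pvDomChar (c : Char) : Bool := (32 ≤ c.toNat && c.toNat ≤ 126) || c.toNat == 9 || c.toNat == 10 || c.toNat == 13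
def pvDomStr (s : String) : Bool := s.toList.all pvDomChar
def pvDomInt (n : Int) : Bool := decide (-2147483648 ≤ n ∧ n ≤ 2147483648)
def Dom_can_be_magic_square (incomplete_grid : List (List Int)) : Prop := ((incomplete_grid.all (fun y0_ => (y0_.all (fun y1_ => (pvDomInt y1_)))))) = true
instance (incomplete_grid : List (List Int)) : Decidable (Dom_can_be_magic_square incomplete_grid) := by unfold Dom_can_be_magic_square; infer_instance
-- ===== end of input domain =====

-- B replaces A's search over all 3-permutations of the missing digits by directly constructing
-- the unique third row forcing every column sum to 15 and checking that single candidate.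

-- Both Pythons compute list(set(range(1,10)) - set(flattened grid)); shared helper (also cited by Pre_).
def pvMissing (g : List (List Int)) : List Int :=
  PySem.Set.diff (PySem.Set.ofList (PySem.List.pyRange 1 10 1)) (PySem.Set.ofList (g.flatMap id))

-- ===== PORT A =====
-- itertools.permutations(l, 3): all ordered triples of distinct positions (order of the
-- enumeration is immaterial: A only asks whether ANY element satisfies the test).
def perms3 (l : List Int) : List (List Int) :=
  l.flatMap (fun x => (l.erase x).flatMap (fun y =>
    ((l.erase x).erase y).map (fun z => [x, y, z])))

-- Python indexing grid[i][c] raises where out of range; ported with getD, exact on the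
-- in-range inputs Pre_ admits.
def is_magic_square (grid : List (List Int)) : Bool :=
  let rows := grid
  let cols := (List.range grid.length).map (fun c => rows.map (fun row => row.getD c 0))
  let d1 := (List.range grid.length).map (fun i => (grid.getD i []).getD i 0)
  let d2 := (List.range grid.length).map (fun i => (grid.getD (grid.length - i - 1) []).getD i 0)
  ((rows ++ cols) ++ [d1, d2]).all (fun line => line.sum == 15)

def can_be_magic_square (incomplete_grid : List (List Int)) : Bool :=
  (perms3 (pvMissing incomplete_grid)).any
    (fun p => is_magic_square (incomplete_grid ++ [p]))

-- ===== PORT B =====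
-- B's helper _magic is, line for line, the module's is_magic_square, so its port reuses
-- the same transliteration above; Python's left-to-right 'and' is &&.
def can_be_magic_square_alt (incomplete_grid : List (List Int)) : Bool :=
  let missing := pvMissing incomplete_grid
  if missing.length < 3 || incomplete_grid.length < 2 then false
  else
    let forced := (List.range 3).map
      (fun c => 15 - (incomplete_grid.map (fun row => row.getD c 0)).sum)
    is_magic_square (incomplete_grid ++ [forced])
      && (PySem.Set.ofList forced).length == 3
      && PySem.Set.issubset (PySem.Set.ofList forced) missing

-- ===== PRECONDITION & SPEC =====
-- Pre_ = exactly the inputs on which Python A returns: fewer than three digits missing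
-- (the permutation loop is empty), the empty grid, one row of length ≥ 2, or two rows of
-- length ≥ 3; on every other shape with ≥ 3 digits missing A raises IndexError.
def Pre_can_be_magic_square (incomplete_grid : List (List Int)) : Prop :=
  (pvMissing incomplete_grid).length < 3
  ∨ incomplete_grid = []
  ∨ (incomplete_grid.length = 1 ∧ 2 ≤ (incomplete_grid.getD 0 []).length)
  ∨ (incomplete_grid.length = 2 ∧ ∀ r ∈ incomplete_grid, 3 ≤ r.length)
instance (incomplete_grid : List (List Int)) : Decidable (Pre_can_be_magic_square incomplete_grid) := by
  unfold Pre_can_be_magic_square; infer_instance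

def pvWitness_can_be_magic_square : List (List Int) := [[8, 1, 6], [3, 5, 7]]

def Spec_can_be_magic_square (incomplete_grid : List (List Int)) (out : Bool) : Prop := out = can_be_magic_square_alt incomplete_grid
instance (incomplete_grid : List (List Int)) (out : Bool) : Decidable (Spec_can_be_magic_square incomplete_grid out) := by unfold Spec_can_be_magic_square; infer_instance

-- ===== CLAIM (what is proved, stated in full; the proofs are below) =====
def Claim_equal_can_be_magic_square : Prop := ∀ (incomplete_grid : List (List Int)), Dom_can_be_magic_square incomplete_grid → Pre_can_be_magic_square incomplete_grid → Spec_can_be_magic_square incomplete_grid (can_be_magic_square incomplete_grid)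

-- ===== LEMMAS AND PROOFS =====

theorem mem_perms3 {p : List Int} {l : List Int} :
    p ∈ perms3 l ↔ ∃ x, x ∈ l ∧ ∃ y, y ∈ l.erase x ∧ ∃ z, z ∈ (l.erase x).erase y ∧ p = [x, y, z] := by
  simp [perms3, eq_comm]

theorem length_ge_of_mem_perms3 {p l : List Int} (h : p ∈ perms3 l) : 3 ≤ l.length := by
  rcases mem_perms3.mp h with ⟨x, hx, y, hy, z, hz, rfl⟩
  have h1 : (l.erase x).length = l.length - 1 := List.length_erase_of_mem hx
  have h2 : ((l.erase x).erase y).length = (l.erase x).length - 1 := List.length_erase_of_mem hy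
  have h3 : 1 ≤ ((l.erase x).erase y).length := List.length_pos_of_mem hz
  have h4 : 1 ≤ l.length := List.length_pos_of_mem hx
  omega

theorem perms3_eq_nil {l : List Int} (h : l.length < 3) : perms3 l = [] := by
  rcases hcons : perms3 l with _ | ⟨p, rest⟩
  · rfl
  · exact absurd (length_ge_of_mem_perms3 (l := l) (p := p) (by rw [hcons]; exact List.mem_cons_self)) (by omega)

theorem nodup_pvMissing (g : List (List Int)) : (pvMissing g).Nodup :=
  PySem.Set.nodup_diff _ _ (PySem.Set.nodup_ofList _)

theorem mem_pvMissing_bound {g : List (List Int)} {x : Int} (h : x ∈ pvMissing g) :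
    1 ≤ x ∧ x ≤ 9 := by
  have h1 := ((PySem.Set.mem_diff _ _ _).mp h).1
  rw [PySem.Set.mem_ofList] at h1
  rw [show PySem.List.pyRange 1 10 1 = [1, 2, 3, 4, 5, 6, 7, 8, 9] by decide] at h1
  simp only [List.mem_cons, List.not_mem_nil, or_false] at h1
  omega

theorem A_false_of_small {g : List (List Int)} (h : (pvMissing g).length < 3) :
    can_be_magic_square g = false := by
  unfold can_be_magic_square
  rw [perms3_eq_nil h]
  rfl

theorem alt_false_of_small {g : List (List Int)} (h : (pvMissing g).length < 3) :
    can_be_magic_square_alt g = false := by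
  simp [can_be_magic_square_alt, h]

theorem magic1_iff (x y z : Int) :
    is_magic_square [[x, y, z]] = true ↔ (x + y + z = 15 ∧ x = 15) := by
  simp [is_magic_square, List.range_succ]
  omega

theorem magic2_iff (r0 : List Int) (x y z : Int) :
    is_magic_square [r0, [x, y, z]] = true ↔
      (r0.sum = 15 ∧ x + y + z = 15 ∧ r0.getD 0 0 + x = 15 ∧ r0.getD 1 0 + y = 15
        ∧ r0.getD 0 0 + y = 15 ∧ x + r0.getD 1 0 = 15) := by
  simp [is_magic_square, List.range_succ]
  omega

theorem magic3_iff (r0 r1 : List Int) (x y z : Int) :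
    is_magic_square [r0, r1, [x, y, z]] = true ↔
      (r0.sum = 15 ∧ r1.sum = 15 ∧ x + y + z = 15
        ∧ r0.getD 0 0 + r1.getD 0 0 + x = 15
        ∧ r0.getD 1 0 + r1.getD 1 0 + y = 15
        ∧ r0.getD 2 0 + r1.getD 2 0 + z = 15
        ∧ r0.getD 0 0 + r1.getD 1 0 + z = 15
        ∧ x + r1.getD 1 0 + r0.getD 2 0 = 15) := by
  simp [is_magic_square, List.range_succ]
  omega

theorem ofList3_iff {x y z : Int} :
    (PySem.Set.ofList [x, y, z]).length = 3 ↔ x ≠ y ∧ x ≠ z ∧ y ≠ z := by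
  simp only [PySem.Set.ofList_cons, PySem.Set.ofList_nil, PySem.Set.discard,
    List.filter_cons, List.filter_nil]
  split_ifs <;> (try by_cases hzx : z = x) <;> simp_all <;> try omega

theorem main0 : can_be_magic_square [] = false := by
  unfold can_be_magic_square
  rw [List.any_eq_false]
  intro p hp
  rcases mem_perms3.mp hp with ⟨x, hx, y, hy, z, hz, rfl⟩
  simp only [List.nil_append]
  intro hmagic
  have hb := mem_pvMissing_bound hx
  have := (magic1_iff x y z).mp hmagic
  omega

theorem main1 (r0 : List Int) : can_be_magic_square [r0] = false := by
  unfold can_be_magic_square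
  rw [List.any_eq_false]
  intro p hp
  rcases mem_perms3.mp hp with ⟨x, hx, y, hy, z, hz, rfl⟩
  have hxy : y ≠ x := ((nodup_pvMissing [r0]).mem_erase_iff.mp hy).1
  simp only [List.cons_append, List.nil_append]
  intro hmagic
  rcases (magic2_iff r0 x y z).mp hmagic with ⟨-, -, hc0, -, hd1, -⟩
  exact hxy (by omega)

theorem main2 (r0 r1 : List Int) (hm : ¬ (pvMissing [r0, r1]).length < 3) :
    can_be_magic_square [r0, r1] = can_be_magic_square_alt [r0, r1] := by
  rw [Bool.eq_iff_iff]
  have hnd := nodup_pvMissing [r0, r1]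
  constructor
  · intro hA
    obtain ⟨p, hp, hmagic⟩ := List.any_eq_true.mp hA
    rcases mem_perms3.mp hp with ⟨x, hx, y, hy, z, hz, rfl⟩
    have hy' := hnd.mem_erase_iff.mp hy
    have hz' := (hnd.erase x).mem_erase_iff.mp hz
    have hz'' := hnd.mem_erase_iff.mp hz'.2
    simp only [List.cons_append, List.nil_append] at hmagic
    obtain ⟨H1, H2, H3, H4, H5, H6, H7, H8⟩ := (magic3_iff r0 r1 x y z).mp hmagic
    simp only [can_be_magic_square_alt, List.range_succ, List.range_zero, List.map_cons,
      List.map_nil, List.sum_cons, List.sum_nil, add_zero, List.nil_append, List.cons_append]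
    rw [if_neg (by simp [hm])]
    rw [show (15 : Int) - (r0.getD 0 0 + r1.getD 0 0) = x by omega,
        show (15 : Int) - (r0.getD 1 0 + r1.getD 1 0) = y by omega,
        show (15 : Int) - (r0.getD 2 0 + r1.getD 2 0) = z by omega]
    rw [Bool.and_eq_true, Bool.and_eq_true]
    refine ⟨⟨hmagic, ?_⟩, ?_⟩
    · rw [beq_iff_eq]
      exact ofList3_iff.mpr ⟨Ne.symm hy'.1, Ne.symm hz''.1, Ne.symm hz'.1⟩
    · rw [PySem.Set.issubset_iff]
      intro w hw
      rw [PySem.Set.mem_ofList] at hw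
      simp only [List.mem_cons, List.not_mem_nil, or_false] at hw
      rcases hw with rfl | rfl | rfl
      · exact hx
      · exact hy'.2
      · exact hz''.2
  · intro hB
    simp only [can_be_magic_square_alt, List.range_succ, List.range_zero, List.map_cons,
      List.map_nil, List.sum_cons, List.sum_nil, add_zero, List.nil_append, List.cons_append] at hB
    rw [if_neg (by simp [hm])] at hB
    rw [Bool.and_eq_true, Bool.and_eq_true] at hB
    obtain ⟨⟨hmagic, hlen⟩, hsub⟩ := hB
    rw [beq_iff_eq] at hlen
    obtain ⟨hxy, hxz, hyz⟩ := ofList3_iff.mp hlen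
    have hmem : ∀ w ∈ [(15:Int) - (r0.getD 0 0 + r1.getD 0 0),
        15 - (r0.getD 1 0 + r1.getD 1 0), 15 - (r0.getD 2 0 + r1.getD 2 0)],
        w ∈ pvMissing [r0, r1] := by
      intro w hw
      exact (PySem.Set.issubset_iff _ _).mp hsub w ((PySem.Set.mem_ofList _ _).mpr hw)
    unfold can_be_magic_square
    rw [List.any_eq_true]
    refine ⟨[15 - (r0.getD 0 0 + r1.getD 0 0), 15 - (r0.getD 1 0 + r1.getD 1 0),
        15 - (r0.getD 2 0 + r1.getD 2 0)],
      mem_perms3.mpr ⟨_, hmem _ (by simp), _,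
        hnd.mem_erase_iff.mpr ⟨Ne.symm hxy, hmem _ (by simp)⟩, _,
        (hnd.erase _).mem_erase_iff.mpr ⟨Ne.symm hyz,
          hnd.mem_erase_iff.mpr ⟨Ne.symm hxz, hmem _ (by simp)⟩⟩, rfl⟩, ?_⟩
    simpa using hmagic

-- ===== VERDICT (by name: the statement is the Claim_ definition above) =====
theorem can_be_magic_square_spec : Claim_equal_can_be_magic_square := by
  intro g _ pre
  unfold Spec_can_be_magic_square
  rcases pre with hm | rfl | ⟨h1, _⟩ | ⟨h2, _⟩
  · rw [A_false_of_small hm, alt_false_of_small hm]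
  · rw [main0]
    exact (by decide : can_be_magic_square_alt [] = false).symm
  · obtain ⟨r0, rfl⟩ := List.length_eq_one_iff.mp h1
    rw [main1]
    by_cases hm : (pvMissing [r0]).length < 3 <;> simp [can_be_magic_square_alt, hm]
  · obtain ⟨r0, r1, rfl⟩ := List.length_eq_two.mp h2
    by_cases hm : (pvMissing [r0, r1]).length < 3
    · rw [A_false_of_small hm, alt_false_of_small hm]
    · exact main2 r0 r1 hm
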